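-- pv_equiv track=rewrite | github.com/npiscitello/note_freq | note_freq.py | numToNote
-- ===== SOURCE A (Python) =====
-- import math
-- from collections import OrderedDict
--
-- SHARP = '#'	# character representing a musical sharp
--
-- FLAT = 'b'	# character representing a musical flat
--
-- NOTE_DICT = OrderedDict([('C', 1), ('D', 3), ('E', 5), ('F', 6),\
-- 					 ('G', 8), ('A', 10), ('B', 12)])
--
-- def numToNote(number):
-- 	"Converts a note number (A0 is note 1) to a textual note (ex. F#5)"
-- 	note_integer = int(math.floor(number + 0.5))
-- 	note_index = (note_integer % 12) - 3
-- 	if note_index < 1: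
-- 		note_index += 12
-- 	if note_index in NOTE_DICT.values():
-- 		for i in NOTE_DICT.items():
-- 			if note_index == i[1]:
-- 				note = i[0]
-- 				break
-- 	else:
-- 		note = ''
-- 		for i in NOTE_DICT.items():
-- 			if note_index - 1 == i[1]:
-- 				note += i[0] + SHARP + '/'
-- 			if note_index + 1 == i[1]:
-- 				note += i[0] + FLAT
-- 				break
-- 	octave_number = int(math.floor(((note_integer - 4) / 12.0) + 1))
-- 	return note + str(octave_number)
-- ===== SOURCE B (Python) =====
-- import math
--
-- # note_index 1..12 -> final note name, accidentals precomputed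
-- _NAMES = ['C', 'C#/Db', 'D', 'D#/Eb', 'E', 'F',
--           'F#/Gb', 'G', 'G#/Ab', 'A', 'A#/Bb', 'B']
--
-- def numToNote(number):
--     "Converts a note number (A0 is note 1) to a textual note (ex. F#5)"
--     note_integer = int(math.floor(number + 0.5))
--     note_index = (note_integer % 12) - 3
--     if note_index < 1:
--         note_index += 12
--     return _NAMES[note_index - 1] + str((note_integer - 4) // 12 + 1)
-- ===== Notes on version B (the rewrite author's own statement) =====
-- stated objective: simpler
-- what changed: Replaces the membership test over NOTE_DICT.values() plus the two scanning loops that assemble the sharp/flat name at runtime with a single precomputed table of all note names indexed directly by note_index, and the float octave formula with the equivalent integer floor division.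
import Mathlib
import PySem

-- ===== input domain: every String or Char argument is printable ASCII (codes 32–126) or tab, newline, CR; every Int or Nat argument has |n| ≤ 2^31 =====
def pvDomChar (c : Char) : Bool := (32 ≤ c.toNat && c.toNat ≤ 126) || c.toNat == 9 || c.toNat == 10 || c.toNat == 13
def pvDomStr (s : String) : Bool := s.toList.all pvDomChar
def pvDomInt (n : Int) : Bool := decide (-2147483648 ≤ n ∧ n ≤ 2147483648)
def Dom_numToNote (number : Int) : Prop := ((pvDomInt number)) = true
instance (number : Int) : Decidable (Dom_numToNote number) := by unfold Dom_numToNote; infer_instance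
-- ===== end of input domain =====

-- B replaces A's membership test and two scanning loops over NOTE_DICT with one
-- precomputed 12-entry name table indexed directly by note_index (objective: simpler).

-- ===== PORT A =====
-- NOTE_DICT as an insertion-ordered association list
def noteDict : List (String × Int) :=
  [("C", 1), ("D", 3), ("E", 5), ("F", 6), ("G", 8), ("A", 10), ("B", 12)]

-- the 'for i in NOTE_DICT.items(): if note_index == i[1]: note = i[0]; break' loop
def findNote (idx : Int) : List (String × Int) → String
  | [] => ""            -- loop falls through (unreachable when the membership test held)
  | (k, v) :: rest => if idx = v then k else findNote idx rest

-- the else-branch loop building note += i[0]+SHARP+'/' and note += i[0]+FLAT with its break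
def buildAcc (idx : Int) (items : List (String × Int)) (note : String) : String :=
  match items with
  | [] => note
  | (k, v) :: rest =>
    let note := if idx - 1 = v then note ++ k ++ "#" ++ "/" else note
    if idx + 1 = v then note ++ k ++ "b" else buildAcc idx rest note

def numToNote (number : Int) : String :=
  -- int(math.floor(number + 0.5)) = number: the argument is an integer and |number| ≤ 2^31,
  -- so number + 0.5 is an exact double and its floor is number
  let note_integer : Int := number
  let note_index := PySem.Int.mod note_integer 12 - 3
  let note_index := if note_index < 1 then note_index + 12 else note_index
  let note :=
    if (noteDict.map Prod.snd).contains note_index then findNote note_index noteDict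
    else buildAcc note_index noteDict ""
  -- int(math.floor(((note_integer - 4) / 12.0) + 1)): exact for |note_integer| ≤ 2^31,
  -- the double quotient never rounds across an integer, so this is floor division
  let octave := PySem.Int.floordiv (note_integer - 4) 12 + 1
  note ++ PySem.Int.toStr octave

-- ===== PORT B =====
-- _NAMES: note_index 1..12 -> final note name, accidentals precomputed
def namesTable : List String :=
  ["C", "C#/Db", "D", "D#/Eb", "E", "F", "F#/Gb", "G", "G#/Ab", "A", "A#/Bb", "B"]

def numToNote_alt (number : Int) : String :=
  -- int(math.floor(number + 0.5)) = number, exact as in port A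
  let note_integer : Int := number
  let note_index := PySem.Int.mod note_integer 12 - 3
  let note_index := if note_index < 1 then note_index + 12 else note_index
  -- _NAMES[note_index - 1]: note_index ∈ [1,12] always, so the index is in range
  ((PySem.List.pyGet? namesTable (note_index - 1)).getD "")
    ++ PySem.Int.toStr (PySem.Int.floordiv (note_integer - 4) 12 + 1)

-- ===== PRECONDITION & SPEC =====
def Spec_numToNote (number : Int) (out : String) : Prop := out = numToNote_alt number
instance (number : Int) (out : String) : Decidable (Spec_numToNote number out) := by unfold Spec_numToNote; infer_instance

-- ===== CLAIM (what is proved, stated in full; the proofs are below) =====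
def Claim_equal_numToNote : Prop := ∀ (number : Int), Dom_numToNote number → Spec_numToNote number (numToNote number)

-- ===== LEMMAS AND PROOFS =====

-- the note-name part of both programs agrees for every residue r = number % 12
theorem note_part_eq (r : Int) (h0 : 0 ≤ r) (h1 : r < 12) :
    (let ni := r - 3
     let ni := if ni < 1 then ni + 12 else ni
     if (noteDict.map Prod.snd).contains ni then findNote ni noteDict
     else buildAcc ni noteDict "") =
    (let ni := r - 3
     let ni := if ni < 1 then ni + 12 else ni
     (PySem.List.pyGet? namesTable (ni - 1)).getD "") := by
  interval_cases r <;> decide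

theorem numToNote_spec' (number : Int) : numToNote number = numToNote_alt number := by
  unfold numToNote numToNote_alt
  have h0 : 0 ≤ PySem.Int.mod number 12 := by
    rw [PySem.Int.mod_eq_emod_of_pos (by norm_num)]; exact Int.emod_nonneg _ (by norm_num)
  have h1 : PySem.Int.mod number 12 < 12 := by
    rw [PySem.Int.mod_eq_emod_of_pos (by norm_num)]; exact Int.emod_lt_of_pos _ (by norm_num)
  have := note_part_eq (PySem.Int.mod number 12) h0 h1
  simp only at this ⊢
  rw [this]

-- ===== VERDICT (by name: the statement is the Claim_ definition above) =====
theorem numToNote_spec : Claim_equal_numToNote := by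
  intro number _
  unfold Spec_numToNote
  exact numToNote_spec' number
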